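-- pv_equiv track=rewrite | github.com/MartijnVermeulen96/InformationRetrievalNLP | FeatureFunctions/helper.py | puncflood
-- ===== SOURCE A (Python) =====
-- from itertools import groupby
-- import string
--
-- def puncflood(tweets):
--     ## ToDo: http:// is not flooding
--     puncfloodfeature =[]
--     for i in range(len(tweets)):
--         counter = 0
--         s = tweets[i]
--         t = [[k,len(list(g))] for k, g in groupby(s)]
--         for element in t:
--             char = element[0]
--             count = element[1]
--             if char in string.punctuation and count > 1:
--                 counter += 1
--         puncfloodfeature.append(counter)
--     return puncfloodfeature
-- ===== SOURCE B (Python) =====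
-- import string
--
-- def puncflood(tweets):
--     punct = set(string.punctuation)
--     feats = []
--     for s in tweets:
--         prev = None
--         count = 0
--         for x, y in zip(s, s[1:]):
--             if x == y and x in punct and x != prev:
--                 count += 1
--             prev = x
--         feats.append(count)
--     return feats
-- ===== Notes on version B (the rewrite author's own statement) =====
-- stated objective: faster
-- what changed: Replaces itertools.groupby run-length materialisation plus a filter over the group list with a single pass over adjacent character pairs that counts run starts (x==y, x punctuation, x differs from the previous char), building no intermediate group list.
import Mathlib
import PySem

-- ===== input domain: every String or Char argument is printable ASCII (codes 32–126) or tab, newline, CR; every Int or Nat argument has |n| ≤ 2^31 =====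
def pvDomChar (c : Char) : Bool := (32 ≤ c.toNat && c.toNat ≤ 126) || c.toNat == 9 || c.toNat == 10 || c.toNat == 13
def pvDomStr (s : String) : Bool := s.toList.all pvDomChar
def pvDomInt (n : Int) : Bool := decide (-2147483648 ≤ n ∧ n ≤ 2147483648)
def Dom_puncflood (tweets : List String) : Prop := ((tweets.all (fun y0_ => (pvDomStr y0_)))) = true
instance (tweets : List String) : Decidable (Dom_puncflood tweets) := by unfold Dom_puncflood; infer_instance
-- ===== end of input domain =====

-- B replaces the groupby-built run-length list with one pass over adjacent character
-- pairs counting run starts; alternative decomposition, same asymptotic cost.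

-- ===== PORT A =====
-- string.punctuation
def pvPunctuation : List Char := "!\"#$%&'()*+,-./:;<=>?@[\\]^_`{|}~".toList

-- itertools.groupby over a string, each group rendered as (key, length) — exact for lists of chars
def pvGroups : List Char → List (Char × Int)
  | [] => []
  | c :: cs =>
      (c, (1 : Int) + (cs.takeWhile (fun x => x == c)).length) ::
        pvGroups (cs.dropWhile (fun x => x == c))
  termination_by l => l.length
  decreasing_by
    exact Nat.lt_succ_of_le (List.length_dropWhile_le _ _)

-- body of A's inner 'for element in t' loop
def pvAStep (counter : Int) (element : Char × Int) : Int :=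
  if pvPunctuation.contains element.1 ∧ element.2 > 1 then counter + 1 else counter

def puncflood (tweets : List String) : List Int :=
  tweets.foldl
    (fun puncfloodfeature s =>
      let t := pvGroups s.toList
      let counter := t.foldl pvAStep (0 : Int)
      puncfloodfeature ++ [counter])
    []

-- ===== PORT B =====
-- body of B's inner 'for x, y in zip(s, s[1:])' loop; state = (prev, count); punct = set(string.punctuation)
def pvBStep (st : Option Char × Int) (xy : Char × Char) : Option Char × Int :=
  (some xy.1,
   if xy.1 = xy.2 ∧ (PySem.Set.ofList pvPunctuation).contains xy.1 ∧ some xy.1 ≠ st.1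
   then st.2 + 1 else st.2)

def puncflood_alt (tweets : List String) : List Int :=
  tweets.foldl
    (fun feats s =>
      let l := s.toList
      let st := (l.zip (l.drop 1)).foldl pvBStep (none, 0)
      feats ++ [st.2])
    []

-- ===== PRECONDITION & SPEC =====
def Spec_puncflood (tweets : List String) (out : List Int) : Prop := out = puncflood_alt tweets
instance (tweets : List String) (out : List Int) : Decidable (Spec_puncflood tweets out) := by unfold Spec_puncflood; infer_instance

-- ===== CLAIM (what is proved, stated in full; the proofs are below) =====
def Claim_equal_puncflood : Prop := ∀ (tweets : List String), Dom_puncflood tweets → Spec_puncflood tweets (puncflood tweets)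

-- ===== LEMMAS AND PROOFS =====

-- recursive midpoint for B's pass
def pvG (p : Option Char) : List Char → Int
  | [] => 0
  | [_] => 0
  | a :: b :: t =>
      (if a = b ∧ pvPunctuation.contains a ∧ some a ≠ p then 1 else 0) + pvG (some a) (b :: t)

-- midpoint for A's count, threading the previous group key
def pvCountG (p : Option Char) : List (Char × Int) → Int
  | [] => 0
  | (k, n) :: gs =>
      (if pvPunctuation.contains k ∧ n > 1 ∧ some k ≠ p then 1 else 0) + pvCountG (some k) gs

theorem pvShiftA (gs : List (Char × Int)) (c : Int) :
    gs.foldl pvAStep c = c + gs.foldl pvAStep 0 := by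
  induction gs generalizing c with
  | nil => simp
  | cons e gs ih =>
      simp only [List.foldl_cons]
      rw [ih (pvAStep c e), ih (pvAStep 0 e)]
      simp [pvAStep]; split_ifs <;> omega

theorem pvShiftB (ps : List (Char × Char)) (p : Option Char) (c : Int) :
    (ps.foldl pvBStep (p, c)).2 = c + (ps.foldl pvBStep (p, 0)).2 := by
  induction ps generalizing p c with
  | nil => simp
  | cons xy ps ih =>
      simp only [List.foldl_cons]
      rw [show pvBStep (p, c) xy = (some xy.1, (pvBStep (p, c) xy).2) from rfl,
          show pvBStep (p, 0) xy = (some xy.1, (pvBStep (p, 0) xy).2) from rfl]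
      rw [ih (some xy.1) (pvBStep (p, c) xy).2, ih (some xy.1) (pvBStep (p, 0) xy).2]
      simp [pvBStep]; split_ifs <;> omega

theorem pvBfold_eq_g (l : List Char) (p : Option Char) :
    ((l.zip (l.drop 1)).foldl pvBStep (p, 0)).2 = pvG p l := by
  induction l generalizing p with
  | nil => simp [pvG]
  | cons a rest ih =>
      cases rest with
      | nil => simp [pvG]
      | cons b t =>
          have hz : (a :: b :: t).zip ((a :: b :: t).drop 1)
              = (a, b) :: ((b :: t).zip ((b :: t).drop 1)) := by simp
          rw [hz]
          simp only [List.foldl_cons]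
          rw [show pvBStep (p, 0) (a, b) = (some a, (pvBStep (p, 0) (a, b)).2) from rfl]
          rw [pvShiftB _ (some a) _, ih (some a)]
          simp [pvG, pvBStep, PySem.Set.contains]

theorem pvG_eq_countG (l : List Char) (p : Option Char) :
    pvG p l = pvCountG p (pvGroups l) := by
  induction l generalizing p with
  | nil => simp [pvG, pvGroups, pvCountG]
  | cons a rest ih =>
      cases rest with
      | nil => simp [pvG, pvGroups, pvCountG]
      | cons b t =>
          by_cases hab : a = b
          · subst hab
            rw [pvGroups]
            simp only [List.takeWhile_cons, beq_self_eq_true, List.dropWhile]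
            have ih' := ih (some a)
            rw [pvGroups] at ih'
            simp only [pvG, pvCountG] at *
            rw [ih']
            have hlen : (0:Int) ≤ ((t.takeWhile (fun x => x == a)).length : Int) := by positivity
            simp only [if_true]
            split_ifs <;> simp_all
          · rw [pvGroups]
            have ht : (b :: t).takeWhile (fun x => x == a) = [] := by
              simp [(by simpa using Ne.symm hab : ¬b = a)]
            have hd : (b :: t).dropWhile (fun x => x == a) = b :: t := by
              simp [(by simpa using Ne.symm hab : ¬b = a)]
            rw [ht, hd]
            simp only [pvG, pvCountG, List.length_nil]
            rw [ih (some a)]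
            simp [hab]

theorem pvHeadDropWhile (cs : List Char) (a b : Char)
    (h : (cs.dropWhile (fun x => x == a)).head? = some b) : b ≠ a := by
  induction cs with
  | nil => simp at h
  | cons c cs ih =>
      by_cases hc : c = a
      · rw [List.dropWhile_cons] at h; simp [hc] at h; exact ih h
      · rw [List.dropWhile_cons] at h
        simp [hc] at h
        exact h ▸ hc

theorem pvCountG_eq_fold (l : List Char) :
    ∀ p, (∀ a, l.head? = some a → p ≠ some a) →
    pvCountG p (pvGroups l) = (pvGroups l).foldl pvAStep 0 := by
  induction l using pvGroups.induct with
  | case1 => intro p _; simp [pvGroups, pvCountG]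
  | case2 a cs ih =>
      intro p hp
      rw [pvGroups]
      simp only [pvCountG, List.foldl_cons]
      rw [pvShiftA]
      have hp' : p ≠ some a := hp a rfl
      have h1 : (if pvPunctuation.contains a ∧ (1 : Int) + ((cs.takeWhile (fun x => x == a)).length : Int) > 1 ∧ some a ≠ p then (1:Int) else 0)
          = pvAStep 0 (a, (1 : Int) + ((cs.takeWhile (fun x => x == a)).length : Int)) := by
        simp only [pvAStep]
        split_ifs <;> simp_all
      rw [h1, ih (some a) (fun b hb => by
        simpa using (pvHeadDropWhile cs a b hb).symm)]

theorem pvPerString (s : String) :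
    (pvGroups s.toList).foldl pvAStep 0
      = ((s.toList.zip (s.toList.drop 1)).foldl pvBStep (none, 0)).2 := by
  rw [pvBfold_eq_g, pvG_eq_countG]
  exact (pvCountG_eq_fold _ none (by simp)).symm

theorem pvOuter (tweets : List String) (acc : List Int) :
    tweets.foldl
      (fun puncfloodfeature s =>
        puncfloodfeature ++ [(pvGroups s.toList).foldl pvAStep 0]) acc
    = tweets.foldl
      (fun feats s =>
        feats ++ [((s.toList.zip (s.toList.drop 1)).foldl pvBStep (none, 0)).2]) acc := by
  simp only [pvPerString]

-- ===== VERDICT (by name: the statement is the Claim_ definition above) =====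
theorem puncflood_spec : Claim_equal_puncflood := by
  intro tweets _
  unfold Spec_puncflood puncflood puncflood_alt
  exact pvOuter tweets []
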